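-- pv_equiv track=rewrite | github.com/pypi-data/pypi-mirror-224 | packages/crawler-commons/crawler_commons-0.0.54-py3-none-any.whl/crawlutils/date_utils.py | get_last_quarter
-- ===== SOURCE A (Python) =====
-- def get_last_quarter(year_month, step=1):
--     year_month = int(year_month)
--     year_month -= 1
--     quarters = [3, 6, 9, 12]
--     while year_month % 100 not in quarters:
--         year_month -= 1
--         if year_month % 100 == 0:
--             year_month -= 100
--             year_month += 12
--     if step == 1:
--         return year_month
--     else:
--         return get_last_quarter(year_month, step=step-1)
-- ===== SOURCE B (Python) =====
-- def get_last_quarter(year_month, step=1):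
--     x = int(year_month) - 1
--     y, m = divmod(x, 100)
--     # linear quarter index: year*4 + quarter - 1
--     q = (4 * y + min(m // 3, 4) - 1) if m >= 3 else (4 * y - 1)
--     q -= step - 1
--     yy, r = divmod(q, 4)
--     return 100 * yy + 3 * (r + 1)
-- ===== Notes on version B (the rewrite author's own statement) =====
-- stated objective: faster
-- what changed: B replaces A's month-by-month countdown loop plus step-deep recursion by a closed form: convert to a linear quarter index (4*year + quarter), subtract step-1, convert back with divmod.
-- outside the precondition, e.g. on get_last_quarter(202001, 9500): A returns -35497, B returns -35497
import Mathlib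
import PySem

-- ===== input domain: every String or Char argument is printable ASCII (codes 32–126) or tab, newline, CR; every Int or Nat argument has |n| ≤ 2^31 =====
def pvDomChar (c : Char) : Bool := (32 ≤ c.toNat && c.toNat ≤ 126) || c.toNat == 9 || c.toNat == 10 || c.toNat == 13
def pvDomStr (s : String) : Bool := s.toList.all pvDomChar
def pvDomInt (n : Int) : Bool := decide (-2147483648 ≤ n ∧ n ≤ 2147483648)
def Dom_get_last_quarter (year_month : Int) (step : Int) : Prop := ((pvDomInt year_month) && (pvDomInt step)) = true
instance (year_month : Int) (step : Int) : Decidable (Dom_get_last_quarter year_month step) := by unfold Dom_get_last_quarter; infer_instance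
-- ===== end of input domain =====

-- B replaces A's month-by-month countdown loop and step-deep recursion by a closed-form
-- linear-quarter-index computation (O(1) instead of O(step)); return values are identical on Pre_.

-- ===== PORT A =====
-- the while loop: decrement, and on crossing month 00 jump back to month 12 of the previous year.
-- The loop always terminates within 90 iterations (proved below in glqLoop300_eq); fuel 300 only
-- makes the same computation total.
def glqLoop : Nat → Int → Int
  | 0, x => x
  | n + 1, x =>
    if PySem.Int.mod x 100 ∈ [(3 : Int), 6, 9, 12] then x
    else
      let y := x - 1
      let y := if PySem.Int.mod y 100 == 0 then y - 100 + 12 else y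
      glqLoop n y

-- the recursion on step; fuel (step-1).toNat matches Python's recursion depth exactly on Pre_.
def glqRec : Nat → Int → Int → Int
  | 0, ym, _step => glqLoop 300 (ym - 1)
  | n + 1, ym, step =>
    let x := glqLoop 300 (ym - 1)
    if step == 1 then x else glqRec n x (step - 1)

def get_last_quarter (year_month : Int) (step : Int) : Int :=
  glqRec (step - 1).toNat year_month step

-- ===== PORT B =====
def get_last_quarter_alt (year_month : Int) (step : Int) : Int :=
  let x := year_month - 1
  let y := PySem.Int.floordiv x 100
  let m := PySem.Int.mod x 100
  let q := if 3 ≤ m then 4 * y + min (PySem.Int.floordiv m 3) 4 - 1 else 4 * y - 1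
  let q2 := q - (step - 1)
  let yy := PySem.Int.floordiv q2 4
  let r := PySem.Int.mod q2 4
  100 * yy + 3 * (r + 1)

-- ===== PRECONDITION & SPEC =====
-- Pre_ excludes step < 1, where A's recursion never terminates (Python RecursionError), and
-- step > 9000, where A's step-deep recursion approaches / exceeds Python's recursion limit
-- and raises RecursionError (the limit is environment-dependent, so a margin is kept and a
-- few inputs on which A still returns are excluded — B returns the same value there, see cites).
def Pre_get_last_quarter (year_month : Int) (step : Int) : Prop := 1 ≤ step ∧ step ≤ 9000
instance (year_month : Int) (step : Int) : Decidable (Pre_get_last_quarter year_month step) := by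
  unfold Pre_get_last_quarter; infer_instance

def pvWitness_get_last_quarter : Int × Int := (202001, 2)

def Spec_get_last_quarter (year_month : Int) (step : Int) (out : Int) : Prop :=
  out = get_last_quarter_alt year_month step
instance (year_month : Int) (step : Int) (out : Int) : Decidable (Spec_get_last_quarter year_month step out) := by
  unfold Spec_get_last_quarter; infer_instance

-- ===== CLAIM (what is proved, stated in full; the proofs are below) =====
def Claim_equal_get_last_quarter : Prop := ∀ (year_month : Int) (step : Int), Dom_get_last_quarter year_month step → Pre_get_last_quarter year_month step → Spec_get_last_quarter year_month step (get_last_quarter year_month step)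

-- ===== LEMMAS AND PROOFS =====

-- closed-form value of A's while loop
def glqQf (x : Int) : Int :=
  if x % 100 < 3 then 100 * (x / 100 - 1) + 12
  else if 12 ≤ x % 100 then 100 * (x / 100) + 12
  else 100 * (x / 100) + 3 * (x % 100 / 3)

-- B's linear quarter index of x (rewritten without min, helper for the proofs)
def glqIdx (x : Int) : Int :=
  if x % 100 < 3 then 4 * (x / 100) - 1
  else if 12 ≤ x % 100 then 4 * (x / 100) + 3
  else 4 * (x / 100) + x % 100 / 3 - 1

lemma glq_mod_eq (x : Int) : PySem.Int.mod x 100 = x % 100 :=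
  PySem.Int.mod_eq_emod_of_pos (by norm_num)

lemma glqLoop_eq (n : Nat) : ∀ (x : Int), (x - glqQf x).toNat < n → glqLoop n x = glqQf x := by
  induction n with
  | zero => intro x h; omega
  | succ n ih =>
    intro x h
    by_cases hq : x % 100 = 3 ∨ x % 100 = 6 ∨ x % 100 = 9 ∨ x % 100 = 12
    · have hx : glqQf x = x := by unfold glqQf; split_ifs <;> omega
      simp only [glqLoop, glq_mod_eq]
      rw [if_pos (by simpa using hq), hx]
    · have hmem : ¬ (x % 100 ∈ [(3 : Int), 6, 9, 12]) := by simpa using hq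
      simp only [glqLoop, glq_mod_eq, if_neg hmem, beq_iff_eq]
      set y := if (x - 1) % 100 = 0 then x - 1 - 100 + 12 else x - 1 with hy
      have hQ : glqQf y = glqQf x := by
        unfold glqQf
        rw [hy]; split_ifs <;> omega
      have hlt : (y - glqQf y).toNat < n := by
        rw [hQ]
        have h0 : 0 ≤ y - glqQf x := by unfold glqQf; rw [hy]; split_ifs <;> omega
        have h1 : y - glqQf x < x - glqQf x := by
          unfold glqQf; rw [hy]; split_ifs <;> omega
        omega
      rw [ih y hlt, hQ]

lemma glqLoop300_eq (x : Int) : glqLoop 300 x = glqQf x := by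
  apply glqLoop_eq
  have h0 : 0 ≤ x - glqQf x ∧ x - glqQf x < 200 := by unfold glqQf; split_ifs <;> omega
  omega

-- the port's min-expression equals the if-cascade index glqIdx
lemma idx_eq_port (x : Int) :
    (if 3 ≤ x % 100 then 4 * (x / 100) + min (x % 100 / 3) 4 - 1 else 4 * (x / 100) - 1) = glqIdx x := by
  have hm0 : 0 ≤ x % 100 := Int.emod_nonneg _ (by norm_num)
  have hm1 : x % 100 < 100 := Int.emod_lt_of_pos _ (by norm_num)
  unfold glqIdx
  split_ifs <;> omega

-- B's port in terms of glqIdx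
lemma alt_eq (ym step : Int) :
    get_last_quarter_alt ym step =
      100 * ((glqIdx (ym - 1) - (step - 1)) / 4) + 3 * ((glqIdx (ym - 1) - (step - 1)) % 4 + 1) := by
  simp only [get_last_quarter_alt,
    PySem.Int.mod_eq_emod_of_pos (show (0:Int) < 100 by norm_num),
    PySem.Int.mod_eq_emod_of_pos (show (0:Int) < 4 by norm_num),
    PySem.Int.floordiv_eq_ediv_of_pos (show (0:Int) < 100 by norm_num),
    PySem.Int.floordiv_eq_ediv_of_pos (show (0:Int) < 3 by norm_num),
    PySem.Int.floordiv_eq_ediv_of_pos (show (0:Int) < 4 by norm_num)]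
  rw [idx_eq_port]

-- conversion back from the index is inverse to glqQf
lemma conv_idx (x : Int) :
    100 * (glqIdx x / 4) + 3 * (glqIdx x % 4 + 1) = glqQf x := by
  have hm0 : 0 ≤ x % 100 := Int.emod_nonneg _ (by norm_num)
  have hm1 : x % 100 < 100 := Int.emod_lt_of_pos _ (by norm_num)
  unfold glqIdx glqQf
  by_cases h1 : x % 100 < 3
  · simp only [if_pos h1]
    have e1 : (4 * (x / 100) - 1) / 4 = x / 100 - 1 := by omega
    have e2 : (4 * (x / 100) - 1) % 4 = 3 := by omega
    rw [e1, e2]; ring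
  · by_cases h2 : 12 ≤ x % 100
    · simp only [if_neg h1, if_pos h2]
      have e1 : (4 * (x / 100) + 3) / 4 = x / 100 := by omega
      have e2 : (4 * (x / 100) + 3) % 4 = 3 := by omega
      rw [e1, e2]; ring
    · simp only [if_neg h1, if_neg h2]
      have hc : 1 ≤ x % 100 / 3 ∧ x % 100 / 3 ≤ 3 := by omega
      have e1 : (4 * (x / 100) + x % 100 / 3 - 1) / 4 = x / 100 := by omega
      have e2 : (4 * (x / 100) + x % 100 / 3 - 1) % 4 = x % 100 / 3 - 1 := by omega
      rw [e1, e2]; ring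

-- previous quarter = index minus one
lemma idx_shift (x : Int) : glqIdx (glqQf x - 1) = glqIdx x - 1 := by
  have hm0 : 0 ≤ x % 100 := Int.emod_nonneg _ (by norm_num)
  have hm1 : x % 100 < 100 := Int.emod_lt_of_pos _ (by norm_num)
  unfold glqQf
  by_cases h1 : x % 100 < 3
  · simp only [if_pos h1]
    have e1 : (100 * (x / 100 - 1) + 12 - 1) % 100 = 11 := by omega
    have e2 : (100 * (x / 100 - 1) + 12 - 1) / 100 = x / 100 - 1 := by omega
    unfold glqIdx
    simp only [e1, e2, if_pos h1]
    split_ifs <;> omega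
  · by_cases h2 : 12 ≤ x % 100
    · simp only [if_neg h1, if_pos h2]
      have e1 : (100 * (x / 100) + 12 - 1) % 100 = 11 := by omega
      have e2 : (100 * (x / 100) + 12 - 1) / 100 = x / 100 := by omega
      unfold glqIdx
      simp only [e1, e2]
      split_ifs <;> omega
    · simp only [if_neg h1, if_neg h2]
      have hc : x % 100 / 3 = 1 ∨ x % 100 / 3 = 2 ∨ x % 100 / 3 = 3 := by omega
      unfold glqIdx
      rcases hc with h | h | h <;> rw [h] <;>
        [ (have e1 : (100 * (x / 100) + 3 * 1 - 1) % 100 = 2 := by omega;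
           have e2 : (100 * (x / 100) + 3 * 1 - 1) / 100 = x / 100 := by omega;
           simp only [e1, e2]; split_ifs <;> omega);
          (have e1 : (100 * (x / 100) + 3 * 2 - 1) % 100 = 5 := by omega;
           have e2 : (100 * (x / 100) + 3 * 2 - 1) / 100 = x / 100 := by omega;
           simp only [e1, e2]; split_ifs <;> omega);
          (have e1 : (100 * (x / 100) + 3 * 3 - 1) % 100 = 8 := by omega;
           have e2 : (100 * (x / 100) + 3 * 3 - 1) / 100 = x / 100 := by omega;
           simp only [e1, e2]; split_ifs <;> omega) ]

lemma glqRec_eq (n : Nat) : ∀ (ym step : Int), step = n + 1 →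
    glqRec n ym step = get_last_quarter_alt ym step := by
  induction n with
  | zero =>
    intro ym step hs
    rw [alt_eq]
    simp only [glqRec, glqLoop300_eq]
    rw [show step - 1 = 0 from by omega, sub_zero, conv_idx]
  | succ n ih =>
    intro ym step hs
    have hne : (step == 1) = false := by
      simp only [beq_eq_false_iff_ne, ne_eq]
      omega
    simp only [glqRec, hne, Bool.false_eq_true, if_false, glqLoop300_eq]
    rw [ih (glqQf (ym - 1)) (step - 1) (by omega)]
    rw [alt_eq, alt_eq, idx_shift,
      show glqIdx (ym - 1) - 1 - (step - 1 - 1) = glqIdx (ym - 1) - (step - 1) from by ring]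

-- ===== VERDICT (by name: the statement is the Claim_ definition above) =====
theorem get_last_quarter_spec : Claim_equal_get_last_quarter := by
  intro ym step _ hpre
  unfold Spec_get_last_quarter get_last_quarter
  obtain ⟨h1, _⟩ := hpre
  exact glqRec_eq (step - 1).toNat ym step (by omega)
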